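-- pv_equiv track=rewrite | github.com/LimaMei/-ex-IMPACTA | impacta 2/numeros.py | eh_quase_armstrong
-- ===== SOURCE A (Python) =====
-- def eh_quase_armstrong(n):
--     if n >= 0:
--         n_string = str(n)
--         tam = len(n_string)
--         soma = 0
--         for item in n_string:
--             soma += int(item)**tam
--         if soma == n + 1 or soma == n - 1:
--             return True
--         else:
--             return False
-- ===== SOURCE B (Python) =====
-- def eh_quase_armstrong(n):
--     if n < 0:
--         return None
--     digits = []
--     m = n
--     while m > 0:
--         digits.append(m % 10)
--         m //= 10
--     if not digits:
--         digits = [0]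
--     tam = len(digits)
--     soma = sum(d ** tam for d in digits)
--     return soma == n + 1 or soma == n - 1
-- ===== Notes on version B (the rewrite author's own statement) =====
-- stated objective: alternative
-- what changed: B extracts the digits arithmetically with a repeated modulo/floor-division loop (no string conversion, no per-character int() parsing) and sums d**tam over that list; negatives still fall through to None like A.
import Mathlib
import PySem

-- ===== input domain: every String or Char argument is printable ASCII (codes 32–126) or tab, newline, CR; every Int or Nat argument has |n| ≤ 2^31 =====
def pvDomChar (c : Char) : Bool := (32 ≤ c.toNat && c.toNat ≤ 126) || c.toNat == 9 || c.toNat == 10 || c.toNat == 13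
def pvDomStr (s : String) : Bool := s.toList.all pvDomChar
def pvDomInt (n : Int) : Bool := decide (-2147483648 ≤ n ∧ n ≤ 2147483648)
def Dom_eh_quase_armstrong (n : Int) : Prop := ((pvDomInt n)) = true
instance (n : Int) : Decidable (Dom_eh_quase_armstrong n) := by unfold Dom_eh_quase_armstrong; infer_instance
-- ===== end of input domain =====

-- B replaces str(n)/per-char int() parsing by arithmetic digit extraction (repeated modulo/floor-division); same cost per digit.


-- ===== PORT A =====
-- literal port of A: str(n), per-character int(), += item**tam.
-- int(item) never raises here (every character of str(n) for n ≥ 0 is a decimal digit), so `.getD 0` is never taken.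
def eh_quase_armstrong (n : Int) : Option Bool :=
  if n ≥ 0 then
    let n_string := PySem.Int.toChars n
    let tam := n_string.length
    let soma := n_string.foldl (fun s item => s + ((PySem.Int.ofChars? [item]).getD 0) ^ tam) 0
    if soma = n + 1 ∨ soma = n - 1 then some true else some false
  else none

-- ===== PORT B =====
-- B's while loop: collect m % 10, m //= 10 (least-significant first)
def pvDigitsB (m : Nat) : List Nat :=
  if m = 0 then [] else m % 10 :: pvDigitsB (m / 10)
decreasing_by exact Nat.div_lt_self (Nat.pos_of_ne_zero (by assumption)) (by norm_num)

def eh_quase_armstrong_alt (n : Int) : Option Bool :=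
  if n < 0 then none
  else
    let digits0 := pvDigitsB n.toNat
    let digits := if digits0 = [] then [0] else digits0
    let tam := digits.length
    let soma := (digits.map (fun d : Nat => ((d : Int) ^ tam))).sum
    some (decide (soma = n + 1) || decide (soma = n - 1))

-- ===== PRECONDITION & SPEC =====
def Spec_eh_quase_armstrong (n : Int) (out : Option Bool) : Prop := out = eh_quase_armstrong_alt n
instance (n : Int) (out : Option Bool) : Decidable (Spec_eh_quase_armstrong n out) := by unfold Spec_eh_quase_armstrong; infer_instance

-- ===== CLAIM (what is proved, stated in full; the proofs are below) =====
def Claim_equal_eh_quase_armstrong : Prop := ∀ (n : Int), Dom_eh_quase_armstrong n → Spec_eh_quase_armstrong n (eh_quase_armstrong n)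

-- ===== LEMMAS AND PROOFS =====

-- B's digit list is Nat.digits 10
lemma pvDigitsB_eq (m : Nat) : pvDigitsB m = Nat.digits 10 m := by
  induction m using Nat.strong_induction_on with
  | _ m ih =>
    rw [pvDigitsB]
    by_cases h : m = 0
    · simp [h]
    · rw [if_neg h, Nat.digits_def' (by norm_num) (Nat.pos_of_ne_zero h),
        ih (m / 10) (Nat.div_lt_self (Nat.pos_of_ne_zero h) (by norm_num))]

-- toDigitsCore with enough fuel writes the reversed digit characters in front of the accumulator
lemma toDigitsCore_eq (f : Nat) : ∀ (m : Nat) (acc : List Char), 0 < m → m ≤ f →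
    Nat.toDigitsCore 10 f m acc = ((Nat.digits 10 m).map Nat.digitChar).reverse ++ acc := by
  induction f with
  | zero => intro m acc hm hf; omega
  | succ f ih =>
    intro m acc hm hf
    rw [Nat.toDigitsCore]
    by_cases h : m / 10 = 0
    · have hm10 : m < 10 := by omega
      rw [if_pos h, Nat.digits_def' (by norm_num) hm, h]
      simp [Nat.mod_eq_of_lt hm10]
    · rw [if_neg h, ih (m / 10) _ (Nat.pos_of_ne_zero h) (by omega),
        Nat.digits_def' (by norm_num) hm]
      simp

lemma toDigits_ten (m : Nat) (hm : 0 < m) :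
    Nat.toDigits 10 m = ((Nat.digits 10 m).map Nat.digitChar).reverse := by
  rw [Nat.toDigits, toDigitsCore_eq (m + 1) m [] hm (by omega), List.append_nil]

-- parsing a single digit character back
lemma ofChars_digitChar (d : Nat) (hd : d < 10) :
    (PySem.Int.ofChars? [Nat.digitChar d]).getD 0 = (d : Int) := by
  interval_cases d <;> decide

lemma foldl_sum (g : Char → Int) (l : List Char) (init : Int) :
    l.foldl (fun s c => s + g c) init = init + (l.map g).sum := by
  induction l generalizing init with
  | nil => simp
  | cons c t ih => simp [List.foldl, ih]; ring

-- ===== VERDICT (by name: the statement is the Claim_ definition above) =====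
theorem eh_quase_armstrong_spec : Claim_equal_eh_quase_armstrong := by
  intro n _
  unfold Spec_eh_quase_armstrong eh_quase_armstrong eh_quase_armstrong_alt
  by_cases hn : n ≥ 0
  · rw [if_pos hn, if_neg (show ¬ n < 0 by omega)]
    set m := n.toNat with hm
    simp only [pvDigitsB_eq]
    have hA : PySem.Int.toChars n = ((Nat.digits 10 m).map Nat.digitChar).reverse ∨ m = 0 := by
      by_cases h0 : m = 0
      · exact Or.inr h0
      · exact Or.inl (by rw [PySem.Int.toChars, if_neg (show ¬ n < 0 by omega), ← hm,
          toDigits_ten m (Nat.pos_of_ne_zero h0)])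
    by_cases h0 : m = 0
    · have hn0 : n = 0 := by omega
      subst hn0
      decide
    · have hmpos : 0 < m := Nat.pos_of_ne_zero h0
      have hdig : Nat.digits 10 m ≠ [] := Nat.digits_ne_nil_iff_ne_zero.mpr h0
      rcases hA with hA | hA
      · rw [hA, if_neg hdig, List.length_reverse, List.length_map]
        set tam := (Nat.digits 10 m).length with htam
        have hsum :
            (((Nat.digits 10 m).map Nat.digitChar).reverse).foldl
              (fun s item => s + ((PySem.Int.ofChars? [item]).getD 0) ^ tam) 0
            = ((Nat.digits 10 m).map (fun d : Nat => ((d : Int) ^ tam))).sum := by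
          rw [foldl_sum (fun c => ((PySem.Int.ofChars? [c]).getD 0) ^ tam), zero_add,
            List.map_reverse, List.sum_reverse, List.map_map]
          congr 1
          apply List.map_congr_left
          intro d hd
          simp only [Function.comp]
          rw [ofChars_digitChar d (Nat.digits_lt_base (by norm_num) hd)]
        rw [hsum]
        set S := ((Nat.digits 10 m).map (fun d : Nat => ((d : Int) ^ tam))).sum with hS
        by_cases hcond : S = n + 1 ∨ S = n - 1
        · rw [if_pos hcond]
          rcases hcond with h | h <;> simp [h]
        · rw [if_neg hcond]
          push Not at hcond
          simp [hcond.1, hcond.2]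
      · exact absurd hA h0
  · rw [if_neg hn, if_pos (show n < 0 by omega)]
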